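-- pv_equiv track=rewrite | github.com/hongren2003/hw2_password_strength_checker | src/password_checker.py | rule_no_triple_repeat
-- ===== SOURCE A (Python) =====
-- from typing import List, Callable, Tuple
--
-- def rule_no_triple_repeat(password: str) -> Tuple[bool, str]:
--     """Check if the password have no triple (or more) repeat.
--
--     Args:
--         password (str)
--
--     Returns:
--         Tuple[bool, str]: (Passed or not, error)
--         Note: error only outputs the starting position of the first repeat.
--     """
--     for i in range(len(password) - 2):
--         if password[i] == password[i + 1] == password[i + 2]:
--             return (
--                 False,
--                 f"Your password has consecutive repeats starting from offset {i}",
--             )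
--     return True, ""
-- ===== SOURCE B (Python) =====
-- from typing import Tuple
--
-- def rule_no_triple_repeat(password: str) -> Tuple[bool, str]:
--     """Run-based scan: walk maximal runs of identical characters; a run of
--     length >= 3 starts exactly at the first triple's offset."""
--     i = 0
--     n = len(password)
--     while i < n:
--         j = i + 1
--         while j < n and password[j] == password[i]:
--             j += 1
--         if j - i >= 3:
--             return (
--                 False,
--                 f"Your password has consecutive repeats starting from offset {i}",
--             )
--         i = j
--     return True, ""
-- ===== Notes on version B (the rewrite author's own statement) =====
-- stated objective: alternative
-- what changed: Replaces the sliding 3-character window over all indices by a scan of maximal runs of identical characters, reporting the start of the first run of length >= 3.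
import Mathlib
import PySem

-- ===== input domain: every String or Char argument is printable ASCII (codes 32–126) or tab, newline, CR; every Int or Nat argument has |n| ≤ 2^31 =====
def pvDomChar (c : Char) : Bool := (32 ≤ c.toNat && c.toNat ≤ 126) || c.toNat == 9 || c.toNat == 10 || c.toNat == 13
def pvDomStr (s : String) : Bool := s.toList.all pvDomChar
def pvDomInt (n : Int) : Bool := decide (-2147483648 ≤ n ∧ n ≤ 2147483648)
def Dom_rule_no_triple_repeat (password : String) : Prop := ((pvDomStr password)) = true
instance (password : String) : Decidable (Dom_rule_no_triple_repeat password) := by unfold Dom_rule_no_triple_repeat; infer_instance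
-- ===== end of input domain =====

-- B scans maximal runs of identical characters instead of A's sliding 3-index window; same result, proved equal.

-- shared formatting helper (the f-string both Pythons build, with the offset rendered in decimal)
def pvMsgAt (i : Nat) : String :=
  "Your password has consecutive repeats starting from offset " ++ PySem.Int.toStr (i : Int)

-- ===== PORT A =====
-- for i in range(len(password) - 2): if password[i] == password[i+1] == password[i+2]: return (False, msg i); return (True, "")
def pvALoop (cs : List Char) (i : Nat) : Bool × String :=
  if _h : i + 2 < cs.length then
    if cs[i]! == cs[i+1]! && cs[i+1]! == cs[i+2]! then (false, pvMsgAt i)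
    else pvALoop cs (i+1)
  else (true, "")
termination_by cs.length - i

def rule_no_triple_repeat (password : String) : Bool × String :=
  pvALoop password.toList 0

-- ===== PORT B =====
-- outer while: i = start of current maximal run; inner while found its end j; run length j-i >= 3 fails.
-- ported structurally: the run after head c has length (takeWhile (· == c)).length, and we continue past the run.
def pvBLoop (cs : List Char) (i : Nat) : Bool × String :=
  match cs with
  | [] => (true, "")
  | c :: rest =>
    let k := 1 + (rest.takeWhile (fun d => d == c)).length   -- run length j - i
    if 3 ≤ k then (false, pvMsgAt i)
    else pvBLoop (rest.drop (k - 1)) (i + k)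
termination_by cs.length
decreasing_by
  simp only [List.length_drop, List.length_cons]; omega

def rule_no_triple_repeat_alt (password : String) : Bool × String :=
  pvBLoop password.toList 0

-- ===== PRECONDITION & SPEC =====
def Spec_rule_no_triple_repeat (password : String) (out : Bool × String) : Prop := out = rule_no_triple_repeat_alt password
instance (password : String) (out : Bool × String) : Decidable (Spec_rule_no_triple_repeat password out) := by unfold Spec_rule_no_triple_repeat; infer_instance

-- ===== CLAIM (what is proved, stated in full; the proofs are below) =====
def Claim_equal_rule_no_triple_repeat : Prop := ∀ (password : String), Dom_rule_no_triple_repeat password → Spec_rule_no_triple_repeat password (rule_no_triple_repeat password)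

-- ===== LEMMAS AND PROOFS =====

-- A's loop, restated structurally on the suffix it still inspects (proof helper)
def pvAStruct (cs : List Char) (i : Nat) : Bool × String :=
  match cs with
  | c1 :: c2 :: c3 :: rest =>
    if c1 == c2 && c2 == c3 then (false, pvMsgAt i)
    else pvAStruct (c2 :: c3 :: rest) (i + 1)
  | _ => (true, "")

theorem pvAStruct_cons3 (c1 c2 c3 : Char) (r : List Char) (i : Nat) :
    pvAStruct (c1 :: c2 :: c3 :: r) i =
      if c1 == c2 && c2 == c3 then (false, pvMsgAt i)
      else pvAStruct (c2 :: c3 :: r) (i + 1) := rfl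

theorem pvAStruct_short (cs : List Char) (i : Nat) (h : cs.length < 3) :
    pvAStruct cs i = (true, "") := by
  match cs with
  | [] => rfl
  | [_] => rfl
  | [_, _] => rfl
  | _ :: _ :: _ :: _ => simp only [List.length_cons] at h; omega

theorem pvBLoop_nil (i : Nat) : pvBLoop [] i = (true, "") := by
  rw [pvBLoop]

theorem pvBLoop_cons (c : Char) (rest : List Char) (i : Nat) :
    pvBLoop (c :: rest) i =
      (if 3 ≤ 1 + (rest.takeWhile (fun d => d == c)).length then (false, pvMsgAt i)
       else pvBLoop (rest.drop (1 + (rest.takeWhile (fun d => d == c)).length - 1))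
              (i + (1 + (rest.takeWhile (fun d => d == c)).length))) := by
  rw [pvBLoop]

theorem pvALoop_eq_struct (cs : List Char) (i : Nat) :
    pvALoop cs i = pvAStruct (cs.drop i) i := by
  by_cases h : i + 2 < cs.length
  · have h0 : i < cs.length := by omega
    have h1 : i + 1 < cs.length := by omega
    have hd : cs.drop i = cs[i] :: cs[i+1] :: cs[i+2] :: cs.drop (i+3) := by
      rw [List.drop_eq_getElem_cons h0, List.drop_eq_getElem_cons h1,
          List.drop_eq_getElem_cons h]
    rw [pvALoop]
    simp only [h, dif_pos]
    rw [hd, pvAStruct_cons3]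
    simp only [List.getElem!_eq_getElem?_getD, List.getElem?_eq_getElem h0,
      List.getElem?_eq_getElem h1, List.getElem?_eq_getElem h, Option.getD_some]
    by_cases hc : (cs[i] == cs[i+1] && cs[i+1] == cs[i+2]) = true
    · simp [hc]
    · simp only [hc, if_false, Bool.false_eq_true]
      rw [pvALoop_eq_struct cs (i+1)]
      have : cs.drop (i+1) = cs[i+1] :: cs[i+2] :: cs.drop (i+3) := by
        rw [List.drop_eq_getElem_cons h1, List.drop_eq_getElem_cons h]
      rw [this]
  · rw [pvALoop]
    simp only [h, dif_neg, not_false_iff]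
    exact (pvAStruct_short _ _ (by simp only [List.length_drop]; omega)).symm
termination_by cs.length - i

theorem pvStruct_eq_bLoop : ∀ (n : Nat) (cs : List Char) (i : Nat), cs.length ≤ n →
    pvAStruct cs i = pvBLoop cs i := by
  intro n
  induction n with
  | zero =>
    intro cs i h
    have : cs = [] := List.eq_nil_of_length_eq_zero (by omega)
    subst this
    rw [pvBLoop_nil]; rfl
  | succ m ih =>
    intro cs i h
    match cs with
    | [] => rw [pvBLoop_nil]; rfl
    | [c] =>
      rw [pvBLoop_cons]
      simp only [List.takeWhile_nil, List.length_nil, List.drop_nil]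
      rw [if_neg (by omega), pvBLoop_nil]
      rfl
    | c1 :: c2 :: rest =>
      by_cases h12 : (c2 == c1) = true
      · have e12 : c2 = c1 := beq_iff_eq.mp h12
        have b12 : (c1 == c2) = true := beq_iff_eq.mpr e12.symm
        match rest with
        | [] =>
          rw [pvBLoop_cons, List.takeWhile_cons_of_pos (p := fun d => d == c1) h12]
          simp only [List.takeWhile_nil, List.length_cons, List.length_nil]
          rw [if_neg (by omega)]
          have hdrop : ([c2] : List Char).drop (1 + (0 + 1) - 1) = [] := rfl
          rw [hdrop, pvBLoop_nil]
          rfl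
        | c3 :: rest' =>
          by_cases h23 : (c3 == c1) = true
          · have e23 : c3 = c1 := beq_iff_eq.mp h23
            have b23 : (c2 == c3) = true := beq_iff_eq.mpr (e23 ▸ e12)
            rw [pvBLoop_cons, List.takeWhile_cons_of_pos (p := fun d => d == c1) h12, List.takeWhile_cons_of_pos (p := fun d => d == c1) h23]
            simp only [List.length_cons]
            rw [if_pos (by omega), pvAStruct_cons3, if_pos (by simp [b12, b23])]
          · have b23 : ¬ (c2 == c3) = true := fun hq => h23 (beq_iff_eq.mpr ((beq_iff_eq.mp hq) ▸ e12))
            rw [pvBLoop_cons, List.takeWhile_cons_of_pos (p := fun d => d == c1) h12, List.takeWhile_cons_of_neg (p := fun d => d == c1) h23]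
            simp only [List.length_cons, List.length_nil]
            rw [if_neg (by omega)]
            have hdrop : (c2 :: c3 :: rest').drop (1 + (0 + 1) - 1) = c3 :: rest' := rfl
            rw [hdrop]
            rw [pvAStruct_cons3, if_neg (by simp [b23])]
            have hA2 : pvAStruct (c2 :: c3 :: rest') (i + 1)
                = pvAStruct (c3 :: rest') (i + 1 + 1) := by
              match rest' with
              | [] => rfl
              | c4 :: r => rw [pvAStruct_cons3, if_neg (by simp [b23])]
            rw [hA2, ih (c3 :: rest') (i + 1 + 1) (by simp only [List.length_cons] at h ⊢; omega)]
      · have b12 : ¬ (c1 == c2) = true := fun hq => h12 (beq_iff_eq.mpr (beq_iff_eq.mp hq).symm)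
        rw [pvBLoop_cons, List.takeWhile_cons_of_neg (p := fun d => d == c1) h12]
        simp only [List.length_nil]
        rw [if_neg (by omega)]
        have hdrop : (c2 :: rest).drop (1 + 0 - 1) = c2 :: rest := rfl
        rw [hdrop]
        have hA : pvAStruct (c1 :: c2 :: rest) i = pvAStruct (c2 :: rest) (i + 1) := by
          match rest with
          | [] => rfl
          | c3 :: r => rw [pvAStruct_cons3, if_neg (by simp [b12])]
        rw [hA, ih (c2 :: rest) (i + 1) (by simp only [List.length_cons] at h ⊢; omega)]

-- ===== VERDICT (by name: the statement is the Claim_ definition above) =====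
theorem rule_no_triple_repeat_spec : Claim_equal_rule_no_triple_repeat := by
  intro password _
  show rule_no_triple_repeat password = rule_no_triple_repeat_alt password
  unfold rule_no_triple_repeat rule_no_triple_repeat_alt
  rw [pvALoop_eq_struct]
  simpa using pvStruct_eq_bLoop password.toList.length password.toList 0 le_rfl
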